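-- pv_equiv track=rewrite | github.com/abdesselam-arch/Master-thesis-code | PersonalModules/Genetic.py | has_non_border_neighbor
-- ===== SOURCE A (Python) =====
-- def has_non_border_neighbor(node, border_nodes, sentinel_solution):
--     for route in sentinel_solution:
--         for i, route_node in enumerate(route):
--             if route_node == node:
--                 neighbor_indices = [i - 1, i + 1]
--                 for index in neighbor_indices:
--                     if 0 <= index < len(route):
--                         neighbor = route[index]
--                         if neighbor not in border_nodes:
--                             return True
--     return False
-- ===== SOURCE B (Python) =====
-- def has_non_border_neighbor(node, border_nodes, sentinel_solution):
--     for route in sentinel_solution: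
--         for a, b in zip(route, route[1:]):
--             if (a == node and b not in border_nodes) or (b == node and a not in border_nodes):
--                 return True
--     return False
-- ===== Notes on version B (the rewrite author's own statement) =====
-- stated objective: simpler
-- what changed: Replaces the occurrence-then-index-probe scan (find node, build [i-1,i+1], bounds-check and index into the route) with a sliding-window scan over consecutive pairs zip(route, route[1:]) that tests both orientations of each pair, removing all index arithmetic and bounds checks.
import Mathlib
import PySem

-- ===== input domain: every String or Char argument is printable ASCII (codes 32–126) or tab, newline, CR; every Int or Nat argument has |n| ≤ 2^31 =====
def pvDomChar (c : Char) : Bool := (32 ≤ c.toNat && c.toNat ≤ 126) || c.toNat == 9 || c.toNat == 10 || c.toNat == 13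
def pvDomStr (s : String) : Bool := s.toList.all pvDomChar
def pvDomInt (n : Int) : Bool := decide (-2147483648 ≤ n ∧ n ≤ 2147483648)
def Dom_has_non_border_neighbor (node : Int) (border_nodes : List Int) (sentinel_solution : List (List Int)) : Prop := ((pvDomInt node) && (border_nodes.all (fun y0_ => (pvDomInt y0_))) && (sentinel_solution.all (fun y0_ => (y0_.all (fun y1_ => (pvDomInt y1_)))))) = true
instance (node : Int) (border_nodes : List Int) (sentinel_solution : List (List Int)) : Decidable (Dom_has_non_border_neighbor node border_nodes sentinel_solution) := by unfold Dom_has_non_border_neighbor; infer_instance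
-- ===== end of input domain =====

-- B replaces A's find-node-then-probe-indices i-1/i+1 scan by a sliding-window scan over
-- consecutive pairs zip(route, route[1:]) (objective: simpler; same return value).

-- ===== PORT A =====
-- for route in sentinel_solution: for i, route_node in enumerate(route): if route_node == node:
--   for index in [i-1, i+1]: if 0 <= index < len(route) and route[index] not in border_nodes: return True
def has_non_border_neighbor (node : Int) (border_nodes : List Int) (sentinel_solution : List (List Int)) : Bool :=
  sentinel_solution.any (fun route =>
    (PySem.List.enumerate route).any (fun p =>
      if p.2 == node then
        ([p.1 - 1, p.1 + 1] : List Int).any (fun index =>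
          if 0 ≤ index ∧ index < (route.length : Int) then
            match PySem.List.pyGet? route index with
            | some neighbor => !(border_nodes.contains neighbor)
            | none => false
          else false)
      else false))

-- ===== PORT B =====
-- for route: for a, b in zip(route, route[1:]): if (a==node and b not in bn) or (b==node and a not in bn): return True
def has_non_border_neighbor_alt (node : Int) (border_nodes : List Int) (sentinel_solution : List (List Int)) : Bool :=
  sentinel_solution.any (fun route =>
    (route.zip (PySem.List.slice route (some 1) none)).any (fun p =>
      (p.1 == node && !(border_nodes.contains p.2)) ||
      (p.2 == node && !(border_nodes.contains p.1))))

-- ===== PRECONDITION & SPEC =====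
def Spec_has_non_border_neighbor (node : Int) (border_nodes : List Int) (sentinel_solution : List (List Int)) (out : Bool) : Prop := out = has_non_border_neighbor_alt node border_nodes sentinel_solution
instance (node : Int) (border_nodes : List Int) (sentinel_solution : List (List Int)) (out : Bool) : Decidable (Spec_has_non_border_neighbor node border_nodes sentinel_solution out) := by unfold Spec_has_non_border_neighbor; infer_instance

-- ===== CLAIM (what is proved, stated in full; the proofs are below) =====
def Claim_equal_has_non_border_neighbor : Prop := ∀ (node : Int) (border_nodes : List Int) (sentinel_solution : List (List Int)), Dom_has_non_border_neighbor node border_nodes sentinel_solution → Spec_has_non_border_neighbor node border_nodes sentinel_solution (has_non_border_neighbor node border_nodes sentinel_solution)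

-- ===== LEMMAS AND PROOFS =====

-- A's inner per-route scan returns true iff some occurrence of `node` has an in-range
-- non-border neighbor at offset -1 or +1.
theorem innerA_iff (node : Int) (bn route : List Int) :
    ((PySem.List.enumerate route).any (fun p =>
      if p.2 == node then
        ([p.1 - 1, p.1 + 1] : List Int).any (fun index =>
          if 0 ≤ index ∧ index < (route.length : Int) then
            match PySem.List.pyGet? route index with
            | some neighbor => !(bn.contains neighbor)
            | none => false
          else false)
      else false) = true) ↔
    ∃ k : Nat, ∃ h : k < route.length, route[k] = node ∧
      ((∃ hk : 1 ≤ k, route[k-1] ∉ bn) ∨ (∃ hk : k + 1 < route.length, route[k+1] ∉ bn)) := by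
  rw [List.any_eq_true]
  constructor
  · rintro ⟨p, hp, hcond⟩
    rw [PySem.List.mem_enumerate_iff] at hp
    obtain ⟨k, hk, rfl⟩ := hp
    simp only [List.any_cons, List.any_nil, Bool.or_false] at hcond
    by_cases heq : route[k] = node
    · refine ⟨k, hk, heq, ?_⟩
      simp only [heq, beq_self_eq_true, if_true] at hcond
      rcases Bool.or_eq_true_iff.mp hcond with h1 | h2
      · -- index = k - 1
        split_ifs at h1 with hrange
        · left
          have hk1 : 1 ≤ k := by omega
          refine ⟨hk1, ?_⟩
          have : (0 : Int) + (k : Int) - 1 = ((k - 1 : Nat) : Int) := by omega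
          rw [this, PySem.List.pyGet?_natCast] at h1
          have hlt : k - 1 < route.length := by omega
          rw [List.getElem?_eq_getElem hlt] at h1
          simpa using h1
      · split_ifs at h2 with hrange
        · right
          have hk1 : k + 1 < route.length := by omega
          refine ⟨hk1, ?_⟩
          have : (0 : Int) + (k : Int) + 1 = ((k + 1 : Nat) : Int) := by omega
          rw [this, PySem.List.pyGet?_natCast] at h2
          rw [List.getElem?_eq_getElem hk1] at h2
          simpa using h2
    · simp [heq] at hcond
  · rintro ⟨k, hk, heq, hnb⟩
    refine ⟨((0 : Int) + k, route[k]), ?_, ?_⟩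
    · rw [PySem.List.mem_enumerate_iff]; exact ⟨k, hk, rfl⟩
    · simp only [heq, beq_self_eq_true, if_true, List.any_cons, List.any_nil, Bool.or_false]
      rcases hnb with ⟨hk1, hmem⟩ | ⟨hk1, hmem⟩
      · apply Bool.or_eq_true_iff.mpr; left
        have hrange : (0 : Int) ≤ 0 + (k : Int) - 1 ∧ 0 + (k : Int) - 1 < (route.length : Int) := by
          omega
        rw [if_pos hrange]
        have : (0 : Int) + (k : Int) - 1 = ((k - 1 : Nat) : Int) := by omega
        rw [this, PySem.List.pyGet?_natCast, List.getElem?_eq_getElem (by omega : k - 1 < route.length)]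
        simpa using hmem
      · apply Bool.or_eq_true_iff.mpr; right
        have hrange : (0 : Int) ≤ 0 + (k : Int) + 1 ∧ 0 + (k : Int) + 1 < (route.length : Int) := by
          omega
        rw [if_pos hrange]
        have : (0 : Int) + (k : Int) + 1 = ((k + 1 : Nat) : Int) := by omega
        rw [this, PySem.List.pyGet?_natCast, List.getElem?_eq_getElem hk1]
        simpa using hmem

-- B's inner per-route scan returns true iff some consecutive pair matches in either orientation.
theorem innerB_iff (node : Int) (bn route : List Int) :
    ((route.zip (PySem.List.slice route (some 1) none)).any (fun p =>
      (p.1 == node && !(bn.contains p.2)) ||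
      (p.2 == node && !(bn.contains p.1))) = true) ↔
    ∃ j : Nat, ∃ h : j + 1 < route.length,
      ((route[j] = node ∧ route[j+1] ∉ bn) ∨ (route[j+1] = node ∧ route[j] ∉ bn)) := by
  rw [PySem.List.slice_from_one, List.any_eq_true]
  constructor
  · rintro ⟨p, hp, hcond⟩
    rw [List.mem_iff_getElem] at hp
    obtain ⟨j, hj, hpj⟩ := hp
    rw [List.length_zip, List.length_tail] at hj
    have hj2 : j + 1 < route.length := by omega
    have : p = (route[j], route[j+1]) := by
      rw [← hpj, List.getElem_zip]
      simp [List.getElem_tail]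
    subst this
    refine ⟨j, hj2, ?_⟩
    rcases Bool.or_eq_true_iff.mp hcond with h | h <;> [left; right] <;>
      · rw [Bool.and_eq_true] at h; simpa using h
  · rintro ⟨j, hj, hc⟩
    refine ⟨(route[j], route[j+1]), ?_, ?_⟩
    · rw [List.mem_iff_getElem]
      have hjlen : j < (route.zip route.tail).length := by
        rw [List.length_zip, List.length_tail]; omega
      refine ⟨j, hjlen, ?_⟩
      rw [List.getElem_zip]; simp [List.getElem_tail]
    · apply Bool.or_eq_true_iff.mpr
      rcases hc with ⟨h1, h2⟩ | ⟨h1, h2⟩ <;> [left; right] <;>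
        · rw [Bool.and_eq_true]; simpa using ⟨h1, h2⟩

theorem inner_eq (node : Int) (bn route : List Int) :
    ((PySem.List.enumerate route).any (fun p =>
      if p.2 == node then
        ([p.1 - 1, p.1 + 1] : List Int).any (fun index =>
          if 0 ≤ index ∧ index < (route.length : Int) then
            match PySem.List.pyGet? route index with
            | some neighbor => !(bn.contains neighbor)
            | none => false
          else false)
      else false)) =
    ((route.zip (PySem.List.slice route (some 1) none)).any (fun p =>
      (p.1 == node && !(bn.contains p.2)) ||
      (p.2 == node && !(bn.contains p.1)))) := by
  rw [Bool.eq_iff_iff, innerA_iff, innerB_iff]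
  constructor
  · rintro ⟨k, hk, heq, ⟨hk1, hmem⟩ | ⟨hk1, hmem⟩⟩
    · refine ⟨k - 1, by omega, Or.inr ⟨?_, hmem⟩⟩
      have h' : route[k - 1 + 1]'(by omega) = route[k] := by congr 1; omega
      rw [h']; exact heq
    · exact ⟨k, hk1, Or.inl ⟨heq, hmem⟩⟩
  · rintro ⟨j, hj, ⟨h1, h2⟩ | ⟨h1, h2⟩⟩
    · exact ⟨j, by omega, h1, Or.inr ⟨hj, h2⟩⟩
    · refine ⟨j + 1, hj, h1, Or.inl ⟨by omega, ?_⟩⟩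
      simpa using h2

-- ===== VERDICT (by name: the statement is the Claim_ definition above) =====
theorem has_non_border_neighbor_spec : Claim_equal_has_non_border_neighbor := by
  intro node bn sol _
  unfold Spec_has_non_border_neighbor has_non_border_neighbor has_non_border_neighbor_alt
  exact congrArg sol.any (funext (fun route => inner_eq node bn route))
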